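-- pv_equiv track=rewrite | github.com/Rabbbint/Laba5 | four.py | is_alphabetical
-- ===== SOURCE A (Python) =====
-- def is_alphabetical(words):
--     if not words:
--         return True
--
--     sorted_words = [sorted(word) for word in words]
--
--     for i in range(len(sorted_words) - 1):
--         if sorted_words[i] != sorted_words[i + 1]:
--             return False
--
--     return True
-- ===== SOURCE B (Python) =====
-- def is_alphabetical(words):
--     if not words:
--         return True
--     first = words[0]
--     return all(
--         len(w) == len(first)
--         and all(w.count(c) == first.count(c) for c in w)
--         for w in words[1:]
--     )
-- ===== Notes on version B (the rewrite author's own statement) =====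
-- stated objective: alternative
-- what changed: Instead of sorting every word and comparing consecutive sorted lists pairwise, B never sorts: it checks each remaining word against the first by length plus per-character occurrence counts (a multiset-equality test by counting).
import Mathlib
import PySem

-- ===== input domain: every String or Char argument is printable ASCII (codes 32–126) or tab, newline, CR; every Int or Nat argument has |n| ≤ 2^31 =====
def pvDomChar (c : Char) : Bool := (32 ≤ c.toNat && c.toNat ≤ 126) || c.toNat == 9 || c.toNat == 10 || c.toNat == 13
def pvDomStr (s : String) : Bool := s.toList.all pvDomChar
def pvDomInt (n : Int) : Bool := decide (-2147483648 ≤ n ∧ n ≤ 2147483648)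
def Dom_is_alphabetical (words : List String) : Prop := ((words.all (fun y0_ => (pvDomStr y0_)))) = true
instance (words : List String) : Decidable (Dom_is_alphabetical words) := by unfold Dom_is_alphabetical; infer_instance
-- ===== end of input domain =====

-- B drops the sorting entirely: it tests each remaining word against the first one by
-- length plus per-character occurrence counts (multiset equality by counting; objective: alternative).

-- ===== PORT A =====
-- the 'for i in range(len(sorted_words) - 1): if …: return False' loop, early return as recursion
def isAlphaGo (sw : List (List Char)) : List Int → Bool
  | [] => true
  | i :: rest =>
    if PySem.List.pyGetD sw i [] ≠ PySem.List.pyGetD sw (i + 1) [] then false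
    else isAlphaGo sw rest

def is_alphabetical (words : List String) : Bool :=
  if words = [] then true
  else
    let sorted_words := words.map (fun w => PySem.List.sorted w.toList (fun c => c) false)
    isAlphaGo sorted_words (PySem.List.pyRange 0 ((sorted_words.length : Int) - 1) 1)

-- ===== PORT B =====
-- 'for c in w' iterates the chars of w; Python's w.count(c) with a single-character needle
-- is exactly the character count, ported as List.count on w.toList.
def is_alphabetical_alt (words : List String) : Bool :=
  match words with
  | [] => true
  | first :: rest =>
    rest.all (fun w =>
      PySem.Str.len w == PySem.Str.len first &&
      w.toList.all (fun c => w.toList.count c == first.toList.count c))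

-- ===== PRECONDITION & SPEC =====
def Spec_is_alphabetical (words : List String) (out : Bool) : Prop := out = is_alphabetical_alt words
instance (words : List String) (out : Bool) : Decidable (Spec_is_alphabetical words out) := by unfold Spec_is_alphabetical; infer_instance

-- ===== CLAIM (what is proved, stated in full; the proofs are below) =====
def Claim_equal_is_alphabetical : Prop := ∀ (words : List String), Dom_is_alphabetical words → Spec_is_alphabetical words (is_alphabetical words)

-- ===== LEMMAS AND PROOFS =====

-- "every pair of elements is equal" — the property A's consecutive-pair scan decides
def pvAllEq {α : Type} (l : List α) : Prop := ∀ x ∈ l, ∀ y ∈ l, x = y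

theorem pvAllEq_of_consec {α : Type} (l : List α)
    (h : ∀ i, (hi : i + 1 < l.length) → l[i]'(by omega) = l[i + 1]'hi) : pvAllEq l := by
  have key : ∀ j, (hj : j < l.length) → l[j]'hj = l[0]'(by omega) := by
    intro j
    induction j with
    | zero => intro _; rfl
    | succ k ih =>
      intro hj
      have hk := h k (by omega)
      rw [← hk]
      exact ih (by omega)
  intro x hx y hy
  obtain ⟨i, hi, rfl⟩ := List.mem_iff_getElem.mp hx
  obtain ⟨j, hj, rfl⟩ := List.mem_iff_getElem.mp hy
  rw [key i hi, key j hj]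

theorem pvConsec_of_allEq {α : Type} (l : List α) (h : pvAllEq l) :
    ∀ i, (hi : i + 1 < l.length) → l[i]'(by omega) = l[i + 1]'hi := by
  intro i hi
  exact h _ (List.getElem_mem _) _ (List.getElem_mem _)

-- A's loop is the 'all' of consecutive-pair equality over the visited indices
theorem isAlphaGo_eq_all (sw : List (List Char)) (is : List Int) :
    isAlphaGo sw is =
      is.all (fun i => decide (PySem.List.pyGetD sw i [] = PySem.List.pyGetD sw (i + 1) [])) := by
  induction is with
  | nil => rfl
  | cons i rest ih =>
    simp only [isAlphaGo, List.all_cons, ih]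
    by_cases h : PySem.List.pyGetD sw i [] = PySem.List.pyGetD sw (i + 1) [] <;> simp [h]

theorem is_alphabetical_iff (words : List String) :
    is_alphabetical words = true ↔
      pvAllEq (words.map (fun w => PySem.List.sorted w.toList (fun c => c) false)) := by
  unfold is_alphabetical
  by_cases hw : words = []
  · simp [hw, pvAllEq]
  · simp only [hw, if_false]
    set sw := words.map (fun w => PySem.List.sorted w.toList (fun c => c) false) with hsw
    rw [isAlphaGo_eq_all]
    rw [List.all_eq_true]
    constructor
    · intro h
      apply pvAllEq_of_consec
      intro i hi
      have hmem : (i : Int) ∈ PySem.List.pyRange 0 ((sw.length : Int) - 1) 1 := by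
        rw [PySem.List.mem_pyRange_one]
        omega
      have := h _ hmem
      rw [decide_eq_true_iff] at this
      rw [PySem.List.pyGetD_eq_getElem sw [] (by omega) (by omega),
          PySem.List.pyGetD_eq_getElem sw [] (by omega) (by omega)] at this
      simpa using this
    · intro h i hmem
      rw [PySem.List.mem_pyRange_one] at hmem
      rw [decide_eq_true_iff]
      rw [PySem.List.pyGetD_eq_getElem sw [] (by omega) (by omega),
          PySem.List.pyGetD_eq_getElem sw [] (by omega) (by omega)]
      have hc := pvConsec_of_allEq sw h i.toNat (by omega)
      have h1 : (i + 1).toNat = i.toNat + 1 := by omega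
      simp only [h1]
      exact hc

-- the counting test B runs for one word DECIDES 'permutation of the first word'
theorem pvCount_iff_perm (w f : List Char) :
    (w.length = f.length ∧ ∀ c ∈ w, w.count c = f.count c) ↔ w.Perm f := by
  constructor
  · rintro ⟨hl, hc⟩
    rw [← Multiset.coe_eq_coe]
    apply Multiset.eq_of_le_of_card_le
    · rw [Multiset.le_iff_count]
      intro a
      by_cases ha : a ∈ w
      · simp [Multiset.coe_count, hc a ha]
      · simp [Multiset.coe_count, List.count_eq_zero_of_not_mem ha]
    · simp [hl]
  · intro hp
    exact ⟨hp.length_eq, fun c _ => hp.count_eq c⟩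

-- A's pairwise scan over the whole list says: every tail word is a permutation of the first
theorem pvAllEq_cons_iff_perm (first : String) (rest : List String) :
    pvAllEq ((first :: rest).map (fun w => PySem.List.sorted w.toList (fun c => c) false)) ↔
      ∀ w ∈ rest, w.toList.Perm first.toList := by
  constructor
  · intro h w hw
    have := h (PySem.List.sorted w.toList (fun c => c) false)
      (by simp; exact Or.inr ⟨w, hw, rfl⟩)
      (PySem.List.sorted first.toList (fun c => c) false) (by simp)
    exact (PySem.List.sorted_id_eq_sorted_id_iff_perm _ _).mp this
  · intro h x hx y hy
    simp only [List.map_cons, List.mem_cons, List.mem_map] at hx hy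
    have key : ∀ z, (z = PySem.List.sorted first.toList (fun c => c) false ∨
        ∃ w ∈ rest, PySem.List.sorted w.toList (fun c => c) false = z) →
        z = PySem.List.sorted first.toList (fun c => c) false := by
      rintro z (rfl | ⟨w, hw, rfl⟩)
      · rfl
      · exact (PySem.List.sorted_id_eq_sorted_id_iff_perm _ _).mpr (h w hw)
    rw [key x hx, key y hy]

theorem is_alphabetical_alt_iff (first : String) (rest : List String) :
    is_alphabetical_alt (first :: rest) = true ↔
      ∀ w ∈ rest, w.toList.Perm first.toList := by
  unfold is_alphabetical_alt
  simp only [List.all_eq_true, Bool.and_eq_true, beq_iff_eq, PySem.Str.len_eq]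
  constructor
  · intro h w hw
    obtain ⟨hl, hc⟩ := h w hw
    exact (pvCount_iff_perm _ _).mp ⟨by exact_mod_cast hl, fun c hcw => by
      have := hc c hcw; omega⟩
  · intro h w hw
    have hp := (pvCount_iff_perm w.toList first.toList).mpr (h w hw)
    exact ⟨by exact_mod_cast hp.1, fun c hcw => by have := hp.2 c hcw; omega⟩

-- ===== VERDICT (by name: the statement is the Claim_ definition above) =====
theorem is_alphabetical_spec : Claim_equal_is_alphabetical := by
  intro words _
  unfold Spec_is_alphabetical
  match words with
  | [] => rfl
  | first :: rest =>
    have hA := (is_alphabetical_iff (first :: rest)).trans (pvAllEq_cons_iff_perm first rest)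
    have hB := is_alphabetical_alt_iff first rest
    by_cases h : ∀ w ∈ rest, w.toList.Perm first.toList
    · rw [hA.mpr h, hB.mpr h]
    · have a1 : is_alphabetical (first :: rest) ≠ true := fun hh => h (hA.mp hh)
      have b1 : is_alphabetical_alt (first :: rest) ≠ true := fun hh => h (hB.mp hh)
      simp only [Bool.not_eq_true] at a1 b1
      rw [a1, b1]
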